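-- pv_equiv track=rewrite | github.com/gsrr/leetcode | leetcode/809. Expressive Words.py | stretchy
-- ===== SOURCE A (Python) =====
-- def stretchy(str1, str2):
--     sc1 = 0
--     ec1 = 0
--     sc2 = 0
--     ec2 = 0
--     while sc1 < len(str1) and sc2 < len(str2):
--         if str1[sc1] != str2[sc2]:
--             return 0
--
--         while ec1 < len(str1) and str1[ec1] == str1[sc1] :
--             ec1 += 1
--         while ec2 < len(str2) and str2[ec2] == str2[sc2] :
--             ec2 += 1
--
--         cnt1 = ec1 - sc1
--         cnt2 = ec2 - sc2
--         if cnt2 > cnt1: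
--             return 0
--         if cnt1 != cnt2:
--             #if cnt1 - 2 < cnt2:
--                 #return 0
--             if cnt1 < 3:
--                 return 0
--         sc1 = ec1
--         sc2 = ec2
--     if sc1 != len(str1) or sc2 != len(str2):
--         return 0
--     return 1
-- ===== SOURCE B (Python) =====
-- def stretchy(str1, str2):
--     def rle(s):
--         groups = []
--         for ch in s:
--             if groups and groups[-1][0] == ch:
--                 c, n = groups[-1]
--                 groups[-1] = (c, n + 1)
--             else:
--                 groups.append((ch, 1))
--         return groups
--
--     g1 = rle(str1)
--     g2 = rle(str2)
--     if len(g1) != len(g2):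
--         return 0
--     for (c1, n1), (c2, n2) in zip(g1, g2):
--         if c1 != c2 or n2 > n1 or (n1 != n2 and n1 < 3):
--             return 0
--     return 1
-- ===== Notes on version B (the rewrite author's own statement) =====
-- stated objective: simpler
-- what changed: B replaces A's four-index interleaved while-loop scan with a two-phase decomposition: build the run-length encodings of both strings in one pass each, then compare the group lists pairwise.
import Mathlib
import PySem

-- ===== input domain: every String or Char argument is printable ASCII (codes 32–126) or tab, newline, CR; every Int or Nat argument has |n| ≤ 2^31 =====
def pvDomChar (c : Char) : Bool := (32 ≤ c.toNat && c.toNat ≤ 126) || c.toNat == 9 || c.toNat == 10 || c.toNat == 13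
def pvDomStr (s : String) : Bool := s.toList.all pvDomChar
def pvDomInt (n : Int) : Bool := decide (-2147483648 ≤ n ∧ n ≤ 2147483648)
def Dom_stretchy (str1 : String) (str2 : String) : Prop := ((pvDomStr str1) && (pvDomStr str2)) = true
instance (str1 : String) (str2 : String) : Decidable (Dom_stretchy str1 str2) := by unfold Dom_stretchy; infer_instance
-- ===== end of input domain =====

-- B builds the run-length encodings of both strings and compares them group by group;
-- same return value as A, no speed claim (both are linear).

-- ===== PORT A =====
-- inner while loops of A: length of the run of `c` at the front of `l`
def countRunA (l : List Char) (c : Char) : Nat :=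
  match l with
  | [] => 0
  | x :: t => if x == c then countRunA t c + 1 else 0

-- A's outer while loop, as recursion on the suffixes starting at sc1/sc2
def loopA (l1 l2 : List Char) : Int :=
  match l1, l2 with
  | [], [] => 1                 -- sc1 == len(str1) and sc2 == len(str2)
  | [], _ :: _ => 0             -- loop exits with sc2 != len(str2)
  | _ :: _, [] => 0             -- loop exits with sc1 != len(str1)
  | c1 :: t1, c2 :: t2 =>
    if c1 != c2 then 0
    else
      let cnt1 := 1 + countRunA t1 c1
      let cnt2 := 1 + countRunA t2 c2
      if cnt2 > cnt1 then 0
      else if cnt1 ≠ cnt2 ∧ cnt1 < 3 then 0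
      else loopA (t1.drop (countRunA t1 c1)) (t2.drop (countRunA t2 c2))
termination_by l1.length
decreasing_by simp

def stretchy (str1 : String) (str2 : String) : Int :=
  loopA str1.toList str2.toList

-- ===== PORT B =====
-- one step of Source B's rle loop: merge into the last group or append a new one
def rleStep (groups : List (Char × Nat)) (ch : Char) : List (Char × Nat) :=
  match groups.getLast? with
  | some (c, n) => if c == ch then groups.dropLast ++ [(c, n + 1)] else groups ++ [(ch, 1)]
  | none => [(ch, 1)]

def rle (s : List Char) : List (Char × Nat) :=
  s.foldl rleStep []

def stretchy_alt (str1 : String) (str2 : String) : Int :=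
  let g1 := rle str1.toList
  let g2 := rle str2.toList
  if g1.length ≠ g2.length then 0
  else if (g1.zip g2).all
      (fun p => p.1.1 == p.2.1 && p.2.2 ≤ p.1.2 && (p.1.2 == p.2.2 || 3 ≤ p.1.2)) then 1
  else 0

-- ===== PRECONDITION & SPEC =====
def Spec_stretchy (str1 : String) (str2 : String) (out : Int) : Prop := out = stretchy_alt str1 str2
instance (str1 : String) (str2 : String) (out : Int) : Decidable (Spec_stretchy str1 str2 out) := by unfold Spec_stretchy; infer_instance

-- ===== CLAIM (what is proved, stated in full; the proofs are below) =====
def Claim_equal_stretchy : Prop := ∀ (str1 : String) (str2 : String), Dom_stretchy str1 str2 → Spec_stretchy str1 str2 (stretchy str1 str2)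

-- ===== LEMMAS AND PROOFS =====

-- the comparison phase of B, as a function of the two group lists
def altCheck (g1 g2 : List (Char × Nat)) : Int :=
  if g1.length ≠ g2.length then 0
  else if (g1.zip g2).all
      (fun p => p.1.1 == p.2.1 && p.2.2 ≤ p.1.2 && (p.1.2 == p.2.2 || 3 ≤ p.1.2)) then 1
  else 0

theorem stretchy_alt_eq_altCheck (str1 str2 : String) :
    stretchy_alt str1 str2 = altCheck (rle str1.toList) (rle str2.toList) := rfl

theorem rleStep_prefix (t : List Char) :
    ∀ (g : List (Char × Nat)) (acc : List (Char × Nat)), g ≠ [] →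
      List.foldl rleStep (acc ++ g) t = acc ++ List.foldl rleStep g t := by
  induction t with
  | nil => intro g acc _; simp
  | cons x t ih =>
    intro g acc hg
    obtain ⟨gl, hgl⟩ := Option.isSome_iff_exists.mp (List.getLast?_isSome.mpr hg)
    rcases gl with ⟨c, n⟩
    have hstep : rleStep (acc ++ g) x = acc ++ rleStep g x := by
      simp only [rleStep, List.getLast?_append_of_ne_nil _ hg, hgl]
      by_cases h : c = x
      · simp [h, List.dropLast_append_of_ne_nil hg]
      · simp [h]
    have hne : rleStep g x ≠ [] := by
      by_cases h : c = x <;> simp [rleStep, hgl, h]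
    simp only [List.foldl_cons, hstep, ih _ _ hne]

theorem foldl_rle_single (t : List Char) :
    ∀ (c : Char) (n : Nat),
      List.foldl rleStep [(c, n)] t
        = (c, n + countRunA t c) :: rle (t.drop (countRunA t c)) := by
  induction t with
  | nil => intro c n; simp [rle, countRunA]
  | cons x t ih =>
    intro c n
    by_cases h : x == c
    · have hc : (c == x) = true := by
        simp_all
      have hx : x = c := by simpa using h
      rw [List.foldl_cons]
      have hst : rleStep [(c, n)] x = [(c, n + 1)] := by simp [rleStep, hc]
      rw [hst, ih c (n + 1)]
      simp [countRunA, h]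
      omega
    · have hc : (c == x) = false := by
        simp at h ⊢
        exact fun hh => h hh.symm
      have : rleStep [(c, n)] x = [(c, n)] ++ [(x, 1)] := by
        simp [rleStep, hc]
      simp only [List.foldl_cons, this,
        rleStep_prefix t [(x, 1)] [(c, n)] (by simp)]
      simp [countRunA, h, rle, rleStep]

theorem rle_cons (c : Char) (t : List Char) :
    rle (c :: t) = (c, 1 + countRunA t c) :: rle (t.drop (countRunA t c)) := by
  have : rle (c :: t) = List.foldl rleStep [(c, 1)] t := by
    simp [rle, rleStep]
  rw [this, foldl_rle_single t c 1]

theorem altCheck_cons (c1 c2 : Char) (n1 n2 : Nat) (a b : List (Char × Nat)) :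
    altCheck ((c1, n1) :: a) ((c2, n2) :: b)
      = if c1 == c2 && n2 ≤ n1 && (n1 == n2 || 3 ≤ n1) then altCheck a b else 0 := by
  by_cases hl : a.length = b.length
  · by_cases hc : (c1 == c2 && n2 ≤ n1 && (n1 == n2 || 3 ≤ n1)) = true
    · have h' := hc
      rw [Bool.and_eq_true, Bool.and_eq_true] at h'
      obtain ⟨⟨ha, hb⟩, hcc⟩ := h'
      simp only [altCheck, List.length_cons, hl, ne_eq, not_true_eq_false, if_false,
        List.zip_cons_cons, List.all_cons]
      simp only [ha, hb, hcc, Bool.true_and]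
      simp
    · simp [altCheck, hl, hc]
  · simp [altCheck, hl]

theorem loopA_cons (c1 c2 : Char) (t1 t2 : List Char) :
    loopA (c1 :: t1) (c2 :: t2)
      = if c1 == c2 && (1 + countRunA t2 c2 ≤ 1 + countRunA t1 c1)
          && ((1 + countRunA t1 c1 : Nat) == 1 + countRunA t2 c2 || 3 ≤ 1 + countRunA t1 c1)
        then loopA (t1.drop (countRunA t1 c1)) (t2.drop (countRunA t2 c2)) else 0 := by
  rw [loopA]
  by_cases hc : c1 = c2
  · simp only [hc, bne_self_eq_false, Bool.false_eq_true, if_false, beq_self_eq_true,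
      Bool.true_and]
    have key : ∀ b1 b2 : Nat, ((decide (b2 ≤ b1) && (b1 == b2 || decide (3 ≤ b1))) = true)
        ↔ (b2 ≤ b1 ∧ (b1 = b2 ∨ 3 ≤ b1)) := by intro b1 b2; simp
    split_ifs with h1 h2 h3 h4 h5
    all_goals try rfl
    all_goals simp only [key] at *
    all_goals omega
  · have hb : (c1 != c2) = true := by simp [bne, hc]
    have hb' : (c1 == c2) = false := by simp [hc]
    simp [hb, hb']

theorem altCheck_nil_right (c : Char) (t : List Char) :
    altCheck (rle (c :: t)) [] = 0 := by
  rw [rle_cons]; simp [altCheck]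

theorem altCheck_nil_left (c : Char) (t : List Char) :
    altCheck [] (rle (c :: t)) = 0 := by
  rw [rle_cons]; simp [altCheck]

theorem loopA_eq_altCheck_bounded (n : Nat) :
    ∀ (l1 l2 : List Char), l1.length ≤ n → loopA l1 l2 = altCheck (rle l1) (rle l2) := by
  induction n with
  | zero =>
    intro l1 l2 h
    have h1 : l1 = [] := by cases l1 <;> simp_all
    subst h1
    cases l2 with
    | nil => simp [loopA, rle, altCheck]
    | cons c t => rw [show rle [] = [] from rfl, altCheck_nil_left]; simp [loopA]
  | succ n ih =>
    intro l1 l2 h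
    match l1, l2 with
    | [], [] => simp [loopA, rle, altCheck]
    | [], c :: t => rw [show rle [] = [] from rfl, altCheck_nil_left]; simp [loopA]
    | c :: t, [] => rw [show rle [] = [] from rfl, altCheck_nil_right]; simp [loopA]
    | c1 :: t1, c2 :: t2 =>
      have hlen : (t1.drop (countRunA t1 c1)).length ≤ n := by
        have := List.length_drop (l := t1) (i := countRunA t1 c1)
        simp at h
        omega
      rw [loopA_cons, rle_cons, rle_cons, altCheck_cons,
        ih (t1.drop (countRunA t1 c1)) (t2.drop (countRunA t2 c2)) hlen]

theorem loopA_eq_altCheck (l1 l2 : List Char) :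
    loopA l1 l2 = altCheck (rle l1) (rle l2) :=
  loopA_eq_altCheck_bounded l1.length l1 l2 (le_refl _)

-- ===== VERDICT (by name: the statement is the Claim_ definition above) =====
theorem stretchy_spec : Claim_equal_stretchy := by
  intro str1 str2 _
  unfold Spec_stretchy
  rw [stretchy_alt_eq_altCheck]
  exact (loopA_eq_altCheck _ _).symm ▸ rfl
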